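-- pv_equiv track=rewrite | github.com/rubannn/Leetcode | 2001 - 2250/2094.py | findEvenNumbers
-- ===== SOURCE A (Python) =====
-- from collections import Counter
-- from typing import List
--
-- def findEvenNumbers(digits: List[int]) -> List[int]:
--     result = []
--     dc = Counter(digits)
--     for x in range(100, 999, 2):
--         check = True
--         for k, v in Counter(map(int, str(x))).items():
--             check = check and dc.get(k, 0) >= v
--         if check:
--             result.append(x)
--     return result
-- ===== SOURCE B (Python) =====
-- from collections import Counter
--
--
-- def findEvenNumbers(digits):
--     cnt = Counter(digits)
--     result = []
--
--     def dfs(pos, num):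
--         if pos == 3:
--             if num % 2 == 0:
--                 result.append(num)
--             return
--         for d in range(10):
--             if cnt[d] > 0 and not (pos == 0 and d == 0):
--                 cnt[d] -= 1
--                 dfs(pos + 1, num * 10 + d)
--                 cnt[d] += 1
--
--     dfs(0, 0)
--     return result
-- ===== Notes on version B (the rewrite author's own statement) =====
-- stated objective: alternative
-- what changed: A scans every even number in range(100,999,2) and tests digit-multiset containment by building a Counter of str(x)'s digits per candidate; B instead builds numbers digit by digit with a recursive backtracking search (DFS) that decrements and restores the shared digit counter, pruning whole subtrees as soon as a digit is unavailable, so no per-candidate string conversion, Counter or containment test exists.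
import Mathlib
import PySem

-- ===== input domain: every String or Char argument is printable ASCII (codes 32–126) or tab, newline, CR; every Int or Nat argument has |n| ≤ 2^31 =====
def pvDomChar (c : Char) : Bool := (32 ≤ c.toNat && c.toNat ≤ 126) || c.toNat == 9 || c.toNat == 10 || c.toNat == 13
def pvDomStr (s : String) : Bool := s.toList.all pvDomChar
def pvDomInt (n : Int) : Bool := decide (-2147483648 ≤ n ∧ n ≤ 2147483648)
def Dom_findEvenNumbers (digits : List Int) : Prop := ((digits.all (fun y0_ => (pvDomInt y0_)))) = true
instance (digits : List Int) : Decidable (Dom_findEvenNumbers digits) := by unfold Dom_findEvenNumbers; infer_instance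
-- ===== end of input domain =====

-- B replaces A's scan of range(100,999,2) with per-candidate digit Counters by a recursive
-- backtracking search that builds the number digit by digit against a decremented counter
-- (objective: alternative algorithm, same cost class).

-- ===== PORT A =====
-- digits of x via str(x), as A does with map(int, str(x)); the .getD 0 default is never
-- reached: every character of str(x) for x in range(100,999,2) is a decimal digit.
def pvDigits (x : Int) : List Int :=
  (PySem.Int.toStr x).toList.map (fun ch => (PySem.Int.ofChars? [ch]).getD 0)

def findEvenNumbers (digits : List Int) : List Int :=
  let dc : PySem.Dict Int Int := PySem.Dict.counter digits
  (PySem.List.pyRange 100 999 2).foldl (fun result x =>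
    let check := (PySem.Dict.counter (pvDigits x)).items.foldl
      (fun check kv => check && decide (dc.getD kv.1 0 ≥ kv.2)) true
    if check then result ++ [x] else result) []

-- ===== PORT B =====
-- Python B's dfs(pos, num) recurses from pos = 0 up to the base case pos == 3; it is ported
-- as structural recursion on the remaining depth r = 3 - pos (so 'pos == 0' is 'r = 2' under
-- the r+1 pattern), and the in-place cnt[d] -= 1 / dfs / cnt[d] += 1 around the call is
-- ported by handing the decremented dict to the recursive call.
def pvDfs : Nat → PySem.Dict Int Int → Int → List Int
  | 0, _, num => if PySem.Int.mod num 2 == 0 then [num] else []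
  | (r+1), cnt, num =>
      (PySem.List.pyRange 0 10 1).foldl (fun acc d =>
        if decide (cnt.getD d 0 > 0) && !(decide (r = 2) && decide (d = 0))
        then acc ++ pvDfs r (cnt.insert d (cnt.getD d 0 - 1)) (num * 10 + d)
        else acc) []

def findEvenNumbers_alt (digits : List Int) : List Int :=
  pvDfs 3 (PySem.Dict.counter digits) 0

-- ===== PRECONDITION & SPEC =====
def Spec_findEvenNumbers (digits : List Int) (out : List Int) : Prop := out = findEvenNumbers_alt digits
instance (digits : List Int) (out : List Int) : Decidable (Spec_findEvenNumbers digits out) := by unfold Spec_findEvenNumbers; infer_instance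

-- ===== CLAIM (what is proved, stated in full; the proofs are below) =====
def Claim_equal_findEvenNumbers : Prop := ∀ (digits : List Int), Dom_findEvenNumbers digits → Spec_findEvenNumbers digits (findEvenNumbers digits)

-- ===== LEMMAS AND PROOFS =====

-- a fold of '&&'s is List.all
theorem pv_foldl_and_all {α : Type} (q : α → Bool) (l : List α) (b : Bool) :
    l.foldl (fun ch kv => ch && q kv) b = (b && l.all q) := by
  induction l generalizing b with
  | nil => simp
  | cons h t ih => simp [ih, Bool.and_assoc]

-- 'if p then out ++ g x else out' accumulation is a flatMap of conditional blocks
theorem pv_foldl_if_append {α β : Type} (p : α → Bool) (g : α → List β) (l : List α)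
    (acc : List β) :
    l.foldl (fun acc x => if p x then acc ++ g x else acc) acc
      = acc ++ l.flatMap (fun x => if p x then g x else []) := by
  induction l generalizing acc with
  | nil => simp
  | cons h t ih => simp only [List.foldl_cons, List.flatMap_cons, ih]; split <;> simp

-- filter-after-map is a flatMap of conditional singletons
theorem pv_filter_map_flat {α β : Type} (p : β → Bool) (f : α → β) (l : List α) :
    (l.map f).filter p = l.flatMap (fun x => if p (f x) then [f x] else []) := by
  induction l with
  | nil => simp
  | cons h t ih => simp only [List.map_cons, List.filter_cons, List.flatMap_cons, ← ih]; split <;> simp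

-- push a constant guard inside a flatMap
theorem pv_if_flat {α β : Type} (c : Bool) (l : List α) (g : α → List β) :
    (if c then l.flatMap g else []) = l.flatMap (fun x => if c then g x else []) := by
  cases c <;> simp

-- merge nested guards
theorem pv_if_if {β : Type} (c d : Bool) (X : List β) :
    (if c then (if d then X else []) else []) = if c && d then X else [] := by
  cases c <;> simp

-- parity of a three-digit composition is the parity of its last digit
theorem pv_mod100 (a b c : Int) :
    PySem.Int.mod (100 * a + 10 * b + c) 2 = PySem.Int.mod c 2 := by
  rw [PySem.Int.mod_eq_emod_of_pos (by norm_num), PySem.Int.mod_eq_emod_of_pos (by norm_num)]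
  omega

-- lookup through one decrementing insert
theorem pv_getD1 (dc : PySem.Dict Int Int) (k x : Int) :
    (dc.insert k (dc.getD k 0 - 1)).getD x 0
      = dc.getD x 0 - (if x = k then 1 else 0) := by
  by_cases h : x = k
  · subst h; simp [PySem.Dict.getD_insert_self]
  · rw [PySem.Dict.getD_insert_of_ne dc _ _ h]; simp [h]

-- A's range is exactly the nested digit enumeration, in order
set_option maxRecDepth 40000 in
theorem pv_range_split : PySem.List.pyRange 100 999 2 =
    (PySem.List.pyRange 1 10 1).flatMap (fun d1 =>
      (PySem.List.pyRange 0 10 1).flatMap (fun d2 =>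
        (PySem.List.pyRange 0 10 2).map (fun d3 => 100*d1+10*d2+d3))) := by decide

set_option maxRecDepth 40000 in
theorem pv_digits_triple : ∀ d1 ∈ PySem.List.pyRange 1 10 1, ∀ d2 ∈ PySem.List.pyRange 0 10 1,
    ∀ d3 ∈ PySem.List.pyRange 0 10 2, pvDigits (100*d1+10*d2+d3) = [d1,d2,d3] := by decide

-- A's multiplicity check over Counter(digits of x) equals the decrement-style availability test
theorem pv_check_eq (cnt : Int → Int) (a b c : Int) :
    ((PySem.Set.ofList [a,b,c]).all fun k => decide (cnt k ≥ (([a,b,c] : List Int).count k : Int)))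
    = (decide (cnt a > 0) && (decide (cnt b - (if b = a then (1:Int) else 0) > 0) &&
       decide (cnt c - (if c = a then (1:Int) else 0) - (if c = b then (1:Int) else 0) > 0))) := by
  rw [Bool.eq_iff_iff]
  by_cases hba : b = a <;> by_cases hca : c = a <;> by_cases hcb : c = b <;> subst_vars <;>
    simp_all [PySem.Set.ofList, PySem.Set.add, PySem.Set.contains, List.count_cons] <;> omega

-- A's inner check at a triple, written as B's three nested counter lookups
theorem pv_point (dc : PySem.Dict Int Int) :
    ∀ d1 ∈ PySem.List.pyRange 1 10 1, ∀ d2 ∈ PySem.List.pyRange 0 10 1,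
      ∀ d3 ∈ PySem.List.pyRange 0 10 2,
      (PySem.Dict.counter (pvDigits (100*d1+10*d2+d3))).items.foldl
          (fun ch kv => ch && decide (dc.getD kv.1 0 ≥ kv.2)) true
      = (decide (dc.getD d1 0 > 0) &&
         (decide ((dc.insert d1 (dc.getD d1 0 - 1)).getD d2 0 > 0) &&
          decide (((dc.insert d1 (dc.getD d1 0 - 1)).insert d2
              ((dc.insert d1 (dc.getD d1 0 - 1)).getD d2 0 - 1)).getD d3 0 > 0))) := by
  intro d1 h1 d2 h2 d3 h3
  rw [pv_digits_triple d1 h1 d2 h2 d3 h3, pv_foldl_and_all, PySem.Dict.items_counter,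
    List.all_map, Bool.true_and,
    pv_getD1 (dc.insert d1 (dc.getD d1 0 - 1)) d2 d3, pv_getD1 dc d1 d3, pv_getD1 dc d1 d2]
  exact pv_check_eq (fun k => dc.getD k 0) d1 d2 d3

-- B's DFS, flattened into the nested conditional enumeration it traverses
theorem pv_B_flat (dc : PySem.Dict Int Int) :
    pvDfs 3 dc 0 = (PySem.List.pyRange 0 10 1).flatMap (fun d1 =>
      (PySem.List.pyRange 0 10 1).flatMap (fun d2 =>
        (PySem.List.pyRange 0 10 1).flatMap (fun d3 =>
          if (decide (dc.getD d1 0 > 0) && !(decide ((2:Nat) = 2) && decide (d1 = 0)))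
             && ((decide ((dc.insert d1 (dc.getD d1 0 - 1)).getD d2 0 > 0)
                    && !(decide ((1:Nat) = 2) && decide (d2 = 0)))
             && ((decide (((dc.insert d1 (dc.getD d1 0 - 1)).insert d2
                      ((dc.insert d1 (dc.getD d1 0 - 1)).getD d2 0 - 1)).getD d3 0 > 0)
                    && !(decide ((0:Nat) = 2) && decide (d3 = 0)))
             && (PySem.Int.mod (((0 * 10 + d1) * 10 + d2) * 10 + d3) 2 == 0)))
          then [((0 * 10 + d1) * 10 + d2) * 10 + d3] else []))) := by
  show pvDfs (2+1) dc 0 = _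
  simp only [pvDfs, pv_foldl_if_append, List.nil_append, pv_if_flat, pv_if_if]

-- strip the pruned d1 = 0 branch
theorem pv_strip0 {β : Type} (g : Int → List β) (h0 : g 0 = []) :
    (PySem.List.pyRange 0 10 1).flatMap g = (PySem.List.pyRange 1 10 1).flatMap g := by
  rw [show PySem.List.pyRange 0 10 1 = 0 :: PySem.List.pyRange 1 10 1 from by decide,
    List.flatMap_cons, h0, List.nil_append]

-- ===== VERDICT (by name: the statement is the Claim_ definition above) =====
theorem findEvenNumbers_spec : Claim_equal_findEvenNumbers := by
  intro digits _
  show findEvenNumbers digits = findEvenNumbers_alt digits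
  simp only [findEvenNumbers, findEvenNumbers_alt]
  rw [PySem.List.foldl_append_if_eq_filter, List.nil_append, pv_range_split, pv_B_flat]
  simp only [List.filter_flatMap, pv_filter_map_flat]
  conv_rhs => rw [pv_strip0 _ (by simp)]
  apply List.flatMap_congr
  intro d1 h1
  have hb1 := PySem.List.mem_pyRange_one.mp h1
  have hd1 : decide (d1 = 0) = false := decide_eq_false (by omega)
  apply List.flatMap_congr
  intro d2 h2
  trans ((PySem.List.pyRange 0 10 2).flatMap (fun d3 =>
    if decide ((PySem.Dict.counter digits).getD d1 0 > 0) &&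
     (decide (((PySem.Dict.counter digits).insert d1 ((PySem.Dict.counter digits).getD d1 0 - 1)).getD d2 0 > 0) &&
      decide ((((PySem.Dict.counter digits).insert d1 ((PySem.Dict.counter digits).getD d1 0 - 1)).insert d2
        (((PySem.Dict.counter digits).insert d1 ((PySem.Dict.counter digits).getD d1 0 - 1)).getD d2 0 - 1)).getD d3 0 > 0))
    then [100 * d1 + 10 * d2 + d3] else []))
  · exact List.flatMap_congr (fun d3 h3 => by
    rw [pv_point (PySem.Dict.counter digits) d1 h1 d2 h2 d3 h3])
  · rw [show PySem.List.pyRange 0 10 2 = [0, 2, 4, 6, 8] from by decide,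
    show PySem.List.pyRange 0 10 1 = [0, 1, 2, 3, 4, 5, 6, 7, 8, 9] from by decide]
    simp only [List.flatMap_cons, List.flatMap_nil, List.append_nil, hd1,
    show ∀ a b c : Int, ((0 * 10 + a) * 10 + b) * 10 + c = 100 * a + 10 * b + c from
      fun a b c => by ring,
    pv_mod100,
    show (PySem.Int.mod (0 : Int) 2 == (0 : Int)) = true from by decide,
    show (PySem.Int.mod (1 : Int) 2 == (0 : Int)) = false from by decide,
    show (PySem.Int.mod (2 : Int) 2 == (0 : Int)) = true from by decide,
    show (PySem.Int.mod (3 : Int) 2 == (0 : Int)) = false from by decide,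
    show (PySem.Int.mod (4 : Int) 2 == (0 : Int)) = true from by decide,
    show (PySem.Int.mod (5 : Int) 2 == (0 : Int)) = false from by decide,
    show (PySem.Int.mod (6 : Int) 2 == (0 : Int)) = true from by decide,
    show (PySem.Int.mod (7 : Int) 2 == (0 : Int)) = false from by decide,
    show (PySem.Int.mod (8 : Int) 2 == (0 : Int)) = true from by decide,
    show (PySem.Int.mod (9 : Int) 2 == (0 : Int)) = false from by decide]
    simp
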